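-- pv_equiv track=rewrite | github.com/denix372/proiectarea-algoritmilor | dp/phase6-lis/lcis.py | lcis
-- ===== SOURCE A (Python) =====
-- def lcis(a, b):
--     n, m = len(a), len(b)
--     dp = [[0] * m for _ in range(n)]
--     ans = 0
--     for i in range(n):
--         for j in range(m):
--             if a[i] == b[j]:
--                 best = 0
--
--                 for p in range(i):
--                     for q in range(j):
--                         if a[p] == b[q] and a[p] < a[i]:
--                             best = max(best, dp[p][q])
--                 dp[i][j] = best + 1
--                 ans = max(ans, dp[i][j])
--             else:
--                 dp[i][j] = 0
--     return ans
-- ===== SOURCE B (Python) =====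
-- def lcis(a, b):
--     # Classic O(n*m) LCIS DP: f[j] = length of an LCIS of a (prefix seen so far)
--     # and b[0..j] that ends with b[j]; `best` carries the max f[q] over q < j
--     # with b[q] < a[i] while scanning row i.
--     m = len(b)
--     f = [0] * m
--     for i in range(len(a)):
--         x = a[i]
--         best = 0
--         for j in range(m):
--             if b[j] < x:
--                 if f[j] > best:
--                     best = f[j]
--             elif b[j] == x and best + 1 > f[j]:
--                 f[j] = best + 1
--     return max(f, default=0)
-- ===== Notes on version B (the rewrite author's own statement) =====
-- stated objective: faster
-- what changed: Replaced the quadruple-nested rescan (for each matching pair, rescan all earlier pairs) by the classic LCIS DP keeping one array f[j] = best LCIS ending at b[j] and a running best over smaller elements while scanning each row.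
import Mathlib
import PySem

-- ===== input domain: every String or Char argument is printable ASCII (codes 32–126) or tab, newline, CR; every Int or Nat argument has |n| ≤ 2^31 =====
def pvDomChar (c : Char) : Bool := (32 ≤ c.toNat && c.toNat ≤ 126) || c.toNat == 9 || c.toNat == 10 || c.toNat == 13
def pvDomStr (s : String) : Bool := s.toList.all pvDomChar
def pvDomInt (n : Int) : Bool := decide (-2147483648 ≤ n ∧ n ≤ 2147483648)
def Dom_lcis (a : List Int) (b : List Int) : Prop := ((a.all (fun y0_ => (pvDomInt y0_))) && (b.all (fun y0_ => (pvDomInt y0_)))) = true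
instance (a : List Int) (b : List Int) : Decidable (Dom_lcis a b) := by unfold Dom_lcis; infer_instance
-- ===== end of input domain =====

-- B replaces A's O(n^2 m^2) rescan of all earlier matching pairs by the classic
-- O(n*m) LCIS DP with a single row array and a running best (objective: faster).

-- ===== PORT A =====
def lcis (a : List Int) (b : List Int) : Int :=
  let n := a.length
  let m := b.length
  let res :=
    (List.range n).foldl (fun (st : List (List Int) × Int) i =>
      (List.range m).foldl (fun (st : List (List Int) × Int) j =>
        let dp := st.1
        let ans := st.2
        if a.getD i 0 = b.getD j 0 then
          let best :=
            (List.range i).foldl (fun best p =>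
              (List.range j).foldl (fun best q =>
                if a.getD p 0 = b.getD q 0 ∧ a.getD p 0 < a.getD i 0 then
                  max best ((dp.getD p []).getD q 0)
                else best) best) 0
          let v := best + 1
          (dp.set i ((dp.getD i []).set j v), max ans v)
        else
          (dp.set i ((dp.getD i []).set j 0), ans)) st)
      (List.replicate n (List.replicate m 0), 0)
  res.2

-- ===== PORT B =====
def lcis_alt (a : List Int) (b : List Int) : Int :=
  let m := b.length
  let f :=
    (List.range a.length).foldl (fun (f : List Int) i =>
      let x := a.getD i 0
      ((List.range m).foldl (fun (st : List Int × Int) j =>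
        let f := st.1
        let best := st.2
        if b.getD j 0 < x then
          (if f.getD j 0 > best then (f, f.getD j 0) else (f, best))
        else if b.getD j 0 = x ∧ best + 1 > f.getD j 0 then
          (f.set j (best + 1), best)
        else (f, best)) (f, 0)).1)
      (List.replicate m 0)
  PySem.List.maxD f (fun y => y) 0

-- ===== PRECONDITION & SPEC =====
def Spec_lcis (a : List Int) (b : List Int) (out : Int) : Prop := out = lcis_alt a b
instance (a : List Int) (b : List Int) (out : Int) : Decidable (Spec_lcis a b out) := by unfold Spec_lcis; infer_instance

-- ===== CLAIM (what is proved, stated in full; the proofs are below) =====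
def Claim_equal_lcis : Prop := ∀ (a : List Int) (b : List Int), Dom_lcis a b → Spec_lcis a b (lcis a b)

-- ===== LEMMAS AND PROOFS =====

-- Ent a b i j : the (mathematical) value A stores in dp[i][j].
def Ent (a b : List Int) (i : Nat) (j : Nat) : Nat :=
  if a.getD i 0 = b.getD j 0 then
    ((Finset.range i).attach.sup fun p =>
      (Finset.range j).sup fun q =>
        if a.getD p.1 0 = b.getD q 0 ∧ a.getD p.1 0 < a.getD i 0 then
          Ent a b p.1 q
        else 0) + 1
  else 0
termination_by i
decreasing_by
  exact Finset.mem_range.mp p.2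

-- Col a b i j = sup over p < i of Ent a b p j (B's f[j] after i rows).
def Col (a b : List Int) : Nat → Nat → Nat
  | 0, _ => 0
  | i+1, j => max (Col a b i j) (Ent a b i j)

theorem Ent_eq (a b : List Int) (i j : Nat) :
    Ent a b i j =
      if a.getD i 0 = b.getD j 0 then
        ((Finset.range i).sup fun p =>
          (Finset.range j).sup fun q =>
            if a.getD p 0 = b.getD q 0 ∧ a.getD p 0 < a.getD i 0 then
              Ent a b p q
            else 0) + 1
      else 0 := by
  rw [Ent.eq_def]
  congr 1
  exact congrArg (· + 1) (Finset.sup_attach (Finset.range i)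
    (fun p => (Finset.range j).sup fun q =>
      if a.getD p 0 = b.getD q 0 ∧ a.getD p 0 < a.getD i 0 then Ent a b p q else 0))

theorem Ent_zero_of_ne (a b : List Int) (i j : Nat)
    (h : a.getD i 0 ≠ b.getD j 0) : Ent a b i j = 0 := by
  rw [Ent_eq, if_neg h]

theorem Col_eq_sup (a b : List Int) (i j : Nat) :
    Col a b i j = (Finset.range i).sup fun p => Ent a b p j := by
  induction i with
  | zero => simp [Col]
  | succ i ih => rw [Col, ih, Finset.range_add_one, Finset.sup_insert, max_comm]

-- The key rectangle identity: A's "best" sup equals B's "best" sup.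
theorem best_swap (a b : List Int) (i j : Nat) :
    ((Finset.range i).sup fun p =>
      (Finset.range j).sup fun q =>
        if a.getD p 0 = b.getD q 0 ∧ a.getD p 0 < a.getD i 0 then Ent a b p q else 0)
    = (Finset.range j).sup fun q =>
        if b.getD q 0 < a.getD i 0 then Col a b i q else 0 := by
  rw [Finset.sup_comm]
  apply Finset.sup_congr rfl
  intro q _
  have hF : ∀ p : Nat,
      (if a.getD p 0 = b.getD q 0 ∧ a.getD p 0 < a.getD i 0 then Ent a b p q else 0)
      = if b.getD q 0 < a.getD i 0 then Ent a b p q else 0 := by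
    intro p
    by_cases hpq : a.getD p 0 = b.getD q 0
    · rw [hpq]
      by_cases hq : b.getD q 0 < a.getD i 0
      · rw [if_pos ⟨rfl, hq⟩, if_pos hq]
      · rw [if_neg (fun hc => hq hc.2), if_neg hq]
    · rw [Ent_zero_of_ne a b p q hpq, if_neg (fun hc => hpq hc.1), ite_self]
  simp only [hF]
  by_cases hq : b.getD q 0 < a.getD i 0
  · rw [if_pos hq, Col_eq_sup]
    apply Finset.sup_congr rfl
    intro p _
    rw [if_pos hq]
  · rw [if_neg hq]
    have h0 : (fun p => if b.getD q 0 < a.getD i 0 then Ent a b p q else 0) = fun _ : Nat => 0 :=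
      funext fun p => if_neg hq
    rw [h0]
    simp

-- Ent in terms of Col (B's recurrence).
theorem Ent_eq_col (a b : List Int) (i j : Nat) :
    Ent a b i j =
      if a.getD i 0 = b.getD j 0 then
        ((Finset.range j).sup fun q =>
          if b.getD q 0 < a.getD i 0 then Col a b i q else 0) + 1
      else 0 := by
  rw [Ent_eq, best_swap]

-- ---------- generic fold-to-sup lemmas ----------

-- A conditional running-max loop over `range j`, whose read agrees with `v` below `j`,
-- computes `max x (cast of the Finset sup)`.
theorem inner_best (j : Nat) (c : Nat → Prop) [DecidablePred c] (r : Nat → Int) (v : Nat → ℕ)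
    (h : ∀ q, q < j → r q = ((v q : ℕ) : Int)) (x : Int) (hx : 0 ≤ x) :
    (List.range j).foldl (fun best q => if c q then max best (r q) else best) x
    = max x (((Finset.range j).sup fun q => if c q then v q else 0 : ℕ) : Int) := by
  induction j with
  | zero => simp [Int.max_eq_left hx]
  | succ j ih =>
    rw [List.range_succ, List.foldl_append,
      ih (fun q hq => h q (Nat.lt_succ_of_lt hq)),
      Finset.range_add_one, Finset.sup_insert]
    simp only [List.foldl_cons, List.foldl_nil]
    by_cases hc : c j
    · rw [if_pos hc, if_pos hc, h j (Nat.lt_succ_self j)]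
      rw [sup_comm, Nat.cast_max, ← max_assoc, max_comm (((v j : ℕ) : Int)) x, max_assoc]
    · rw [if_neg hc, if_neg hc]
      simp

theorem nested_best (i j : Nat) (c : Nat → Nat → Prop) [∀ p q, Decidable (c p q)]
    (r : Nat → Nat → Int) (v : Nat → Nat → ℕ)
    (h : ∀ p, p < i → ∀ q, q < j → r p q = ((v p q : ℕ) : Int)) (x : Int) (hx : 0 ≤ x) :
    (List.range i).foldl (fun best p =>
      (List.range j).foldl (fun best q => if c p q then max best (r p q) else best) best) x
    = max x (((Finset.range i).sup fun p =>
        (Finset.range j).sup fun q => if c p q then v p q else 0 : ℕ) : Int) := by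
  induction i with
  | zero => simp [Int.max_eq_left hx]
  | succ i ih =>
    rw [List.range_succ, List.foldl_append,
      ih (fun p hp => h p (Nat.lt_succ_of_lt hp)),
      Finset.range_add_one, Finset.sup_insert]
    simp only [List.foldl_cons, List.foldl_nil]
    rw [inner_best j (c i) (r i) (v i) (h i (Nat.lt_succ_self i)) _
      (le_max_of_le_left hx)]
    rw [sup_comm, Nat.cast_max, ← max_assoc,
      max_comm ((((Finset.range j).sup fun q => if c i q then v i q else 0 : ℕ) : Int)) x,
      max_assoc]

-- ---------- shapes of A's state ----------

def rowFull (a b : List Int) (i : Nat) : List Int :=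
  (List.range b.length).map fun q => ((Ent a b i q : ℕ) : Int)

def mixRow (a b : List Int) (i j : Nat) : List Int :=
  (List.range b.length).map fun q => if q < j then ((Ent a b i q : ℕ) : Int) else 0

def dpMix (a b : List Int) (i j : Nat) : List (List Int) :=
  (List.range a.length).map fun p =>
    if p < i then rowFull a b p
    else if p = i then mixRow a b i j
    else List.replicate b.length 0

def dpAt (a b : List Int) (i : Nat) : List (List Int) :=
  (List.range a.length).map fun p =>
    if p < i then rowFull a b p else List.replicate b.length 0

def ansSup (a b : List Int) (i : Nat) : ℕ :=
  (Finset.range i).sup fun p => (Finset.range b.length).sup fun q => Ent a b p q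

def ansMix (a b : List Int) (i j : Nat) : ℕ :=
  ansSup a b i ⊔ ((Finset.range j).sup fun q => Ent a b i q)

-- A's loop bodies, named (definitionally equal to the lambdas inside `lcis`).
def innerA (a b : List Int) (i : Nat) (st : List (List Int) × Int) (j : Nat) :
    List (List Int) × Int :=
  let dp := st.1
  let ans := st.2
  if a.getD i 0 = b.getD j 0 then
    let best :=
      (List.range i).foldl (fun best p =>
        (List.range j).foldl (fun best q =>
          if a.getD p 0 = b.getD q 0 ∧ a.getD p 0 < a.getD i 0 then
            max best ((dp.getD p []).getD q 0)
          else best) best) 0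
    let v := best + 1
    (dp.set i ((dp.getD i []).set j v), max ans v)
  else
    (dp.set i ((dp.getD i []).set j 0), ans)

def outerA (a b : List Int) (st : List (List Int) × Int) (i : Nat) : List (List Int) × Int :=
  (List.range b.length).foldl (innerA a b i) st

theorem lcis_eq (a b : List Int) :
    lcis a b = ((List.range a.length).foldl (outerA a b)
      (List.replicate a.length (List.replicate b.length 0), 0)).2 := rfl

-- ---------- small list-shape lemmas ----------

theorem map_range_set {α : Type} (k i : Nat) (f : Nat → α) (v : α) :
    ((List.range k).map f).set i v
    = (List.range k).map fun t => if t = i then v else f t := by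
  apply List.ext_getElem
  · simp
  · intro t h1 h2
    simp only [List.length_set, List.length_map, List.length_range] at h1
    rw [List.getElem_set]
    simp only [List.getElem_map, List.getElem_range]
    by_cases h : i = t
    · subst h; simp
    · rw [if_neg h, if_neg (fun ht => h ht.symm)]

theorem mixRow_zero (a b : List Int) (i : Nat) :
    mixRow a b i 0 = List.replicate b.length 0 := by
  unfold mixRow
  rw [List.map_congr_left (g := fun _ => (0 : Int)) (fun q _ => by simp)]
  simp [List.map_const']

theorem dpMix_zero (a b : List Int) (i : Nat) : dpMix a b i 0 = dpAt a b i := by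
  unfold dpMix dpAt
  apply List.map_congr_left
  intro p _
  by_cases h1 : p < i
  · rw [if_pos h1, if_pos h1]
  · rw [if_neg h1, if_neg h1]
    by_cases h2 : p = i
    · rw [if_pos h2, mixRow_zero]
    · rw [if_neg h2]

theorem mixRow_full (a b : List Int) (i : Nat) : mixRow a b i b.length = rowFull a b i := by
  unfold mixRow rowFull
  exact List.map_congr_left fun q hq => if_pos (List.mem_range.mp hq)

theorem dpMix_full (a b : List Int) (i : Nat) : dpMix a b i b.length = dpAt a b (i + 1) := by
  unfold dpMix dpAt
  apply List.map_congr_left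
  intro p _
  by_cases h1 : p < i
  · rw [if_pos h1, if_pos (Nat.lt_succ_of_lt h1)]
  · rw [if_neg h1]
    by_cases h2 : p = i
    · subst h2
      rw [if_pos rfl, if_pos (Nat.lt_succ_self p), mixRow_full]
    · rw [if_neg h2, if_neg (by omega)]

theorem ansMix_zero (a b : List Int) (i : Nat) : ansMix a b i 0 = ansSup a b i := by
  simp [ansMix]

theorem ansMix_full (a b : List Int) (i : Nat) : ansMix a b i b.length = ansSup a b (i + 1) := by
  unfold ansMix ansSup
  rw [Finset.range_add_one, Finset.sup_insert, sup_comm]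

-- ---------- A's inner loop ----------

theorem A_row_partial (a b : List Int) (i j : Nat) (hi : i < a.length) (hj : j ≤ b.length) :
    (List.range j).foldl (innerA a b i) (dpAt a b i, ((ansSup a b i : ℕ) : Int))
    = (dpMix a b i j, ((ansMix a b i j : ℕ) : Int)) := by
  induction j with
  | zero => rw [dpMix_zero, ansMix_zero]; rfl
  | succ j ih =>
    have hjm : j < b.length := hj
    rw [List.range_succ, List.foldl_append, ih (Nat.le_of_lt hjm)]
    simp only [List.foldl_cons, List.foldl_nil]
    show innerA a b i (dpMix a b i j, _) j = _
    unfold innerA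
    have hread : ∀ p, p < i → ∀ q, q < j →
        (((dpMix a b i j).getD p []).getD q 0) = ((Ent a b p q : ℕ) : Int) := by
      intro p hp q hq
      unfold dpMix
      rw [PySem.List.getD_map_range _ _ _ _ (lt_trans hp hi), if_pos hp]
      unfold rowFull
      rw [PySem.List.getD_map_range _ _ _ _ (lt_trans hq hjm)]
    have hrowi : (dpMix a b i j).getD i [] = mixRow a b i j := by
      unfold dpMix
      rw [PySem.List.getD_map_range _ _ _ _ hi, if_neg (lt_irrefl i), if_pos rfl]
    have hbest := nested_best i j
      (fun p q => a.getD p 0 = b.getD q 0 ∧ a.getD p 0 < a.getD i 0)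
      (fun p q => ((dpMix a b i j).getD p []).getD q 0)
      (fun p q => Ent a b p q) hread 0 le_rfl
    have hsetrow : ∀ w : Int, (mixRow a b i j).set j w
        = (List.range b.length).map fun q =>
            if q = j then w else if q < j then ((Ent a b i q : ℕ) : Int) else 0 := by
      intro w
      unfold mixRow
      exact map_range_set b.length j _ w
    have hansmix : ansMix a b i (j + 1) = ansMix a b i j ⊔ Ent a b i j := by
      unfold ansMix
      rw [Finset.range_add_one, Finset.sup_insert, sup_comm (Ent a b i j), sup_assoc]
    by_cases hab : a.getD i 0 = b.getD j 0
    · rw [if_pos hab]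
      simp only [hbest, hrowi]
      have hent : Ent a b i j
          = ((Finset.range i).sup fun p => (Finset.range j).sup fun q =>
              if a.getD p 0 = b.getD q 0 ∧ a.getD p 0 < a.getD i 0 then Ent a b p q else 0) + 1 := by
        rw [Ent_eq, if_pos hab]
      rw [Prod.mk.injEq]
      refine ⟨?_, ?_⟩
      · -- dp component
        rw [hsetrow]
        unfold dpMix
        rw [map_range_set _ _ _ _]
        apply List.map_congr_left
        intro p _
        by_cases h1 : p = i
        · subst h1
          rw [if_pos rfl, if_neg (lt_irrefl p), if_pos rfl]
          unfold mixRow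
          apply List.map_congr_left
          intro q _
          by_cases h2 : q = j
          · subst h2
            rw [if_pos rfl, if_pos (Nat.lt_succ_self q), hent]
            push_cast
            rw [Int.max_eq_right (Int.natCast_nonneg _)]
          · rw [if_neg h2]
            by_cases h3 : q < j
            · rw [if_pos h3, if_pos (Nat.lt_succ_of_lt h3)]
            · rw [if_neg h3, if_neg (by omega)]
        · rw [if_neg h1]
          by_cases h0 : p < i
          · rw [if_pos h0, if_pos h0]
          · rw [if_neg h0, if_neg h0, if_neg h1, if_neg h1]
      · -- ans component
        rw [hansmix, hent]
        push_cast
        rw [Int.max_eq_right (Int.natCast_nonneg _)]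
    · rw [if_neg hab]
      have hent0 : Ent a b i j = 0 := Ent_zero_of_ne a b i j hab
      rw [Prod.mk.injEq]
      refine ⟨?_, ?_⟩
      · rw [hrowi, hsetrow]
        unfold dpMix
        rw [map_range_set _ _ _ _]
        apply List.map_congr_left
        intro p _
        by_cases h1 : p = i
        · subst h1
          rw [if_pos rfl, if_neg (lt_irrefl p), if_pos rfl]
          unfold mixRow
          apply List.map_congr_left
          intro q _
          by_cases h2 : q = j
          · subst h2
            rw [if_pos rfl, if_pos (Nat.lt_succ_self q), hent0]
            simp
          · rw [if_neg h2]
            by_cases h3 : q < j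
            · rw [if_pos h3, if_pos (Nat.lt_succ_of_lt h3)]
            · rw [if_neg h3, if_neg (by omega)]
        · rw [if_neg h1]
          by_cases h0 : p < i
          · rw [if_pos h0, if_pos h0]
          · rw [if_neg h0, if_neg h0, if_neg h1, if_neg h1]
      · rw [hansmix, hent0]
        simp

theorem A_outer (a b : List Int) (i : Nat) (hi : i ≤ a.length) :
    (List.range i).foldl (outerA a b)
      (List.replicate a.length (List.replicate b.length 0), 0)
    = (dpAt a b i, ((ansSup a b i : ℕ) : Int)) := by
  induction i with
  | zero =>
    rw [Prod.mk.injEq]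
    refine ⟨?_, by simp [ansSup]⟩
    unfold dpAt
    simp [List.map_const']
  | succ i ih =>
    have hin : i < a.length := hi
    rw [List.range_succ, List.foldl_append, ih (Nat.le_of_lt hin)]
    simp only [List.foldl_cons, List.foldl_nil]
    show outerA a b (dpAt a b i, _) i = _
    unfold outerA
    rw [A_row_partial a b i b.length hin le_rfl, dpMix_full, ansMix_full]

theorem lcis_char (a b : List Int) :
    lcis a b = ((ansSup a b a.length : ℕ) : Int) := by
  rw [lcis_eq, A_outer a b a.length le_rfl]

-- ---------- shapes of B's state ----------

def fRowB (a b : List Int) (i : Nat) : List Int :=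
  (List.range b.length).map fun j => ((Col a b i j : ℕ) : Int)

def fMixB (a b : List Int) (i j : Nat) : List Int :=
  (List.range b.length).map fun q =>
    if q < j then ((Col a b (i + 1) q : ℕ) : Int) else ((Col a b i q : ℕ) : Int)

def bSup (a b : List Int) (i j : Nat) : ℕ :=
  (Finset.range j).sup fun q => if b.getD q 0 < a.getD i 0 then Col a b i q else 0

-- B's loop bodies, named (definitionally equal to the lambdas inside `lcis_alt`).
def innerB (a b : List Int) (i : Nat) (st : List Int × Int) (j : Nat) : List Int × Int :=
  let x := a.getD i 0
  let f := st.1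
  let best := st.2
  if b.getD j 0 < x then
    (if f.getD j 0 > best then (f, f.getD j 0) else (f, best))
  else if b.getD j 0 = x ∧ best + 1 > f.getD j 0 then
    (f.set j (best + 1), best)
  else (f, best)

def outerB (a b : List Int) (f : List Int) (i : Nat) : List Int :=
  ((List.range b.length).foldl (innerB a b i) (f, 0)).1

theorem lcis_alt_eq (a b : List Int) :
    lcis_alt a b = PySem.List.maxD
      ((List.range a.length).foldl (outerB a b) (List.replicate b.length 0))
      (fun y => y) 0 := rfl

theorem fMixB_zero (a b : List Int) (i : Nat) : fMixB a b i 0 = fRowB a b i := by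
  unfold fMixB fRowB
  exact List.map_congr_left fun q _ => by simp

theorem fMixB_full (a b : List Int) (i : Nat) : fMixB a b i b.length = fRowB a b (i + 1) := by
  unfold fMixB fRowB
  exact List.map_congr_left fun q hq => if_pos (List.mem_range.mp hq)

theorem bSup_succ (a b : List Int) (i j : Nat) :
    bSup a b i (j + 1)
    = (if b.getD j 0 < a.getD i 0 then Col a b i j else 0) ⊔ bSup a b i j := by
  unfold bSup
  rw [Finset.range_add_one, Finset.sup_insert]

theorem Ent_eq_bSup (a b : List Int) (i j : Nat) (hab : a.getD i 0 = b.getD j 0) :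
    Ent a b i j = bSup a b i j + 1 := by
  rw [Ent_eq_col, if_pos hab]; rfl

-- ---------- B's inner loop ----------

theorem B_row_partial (a b : List Int) (i j : Nat) (hj : j ≤ b.length) :
    (List.range j).foldl (innerB a b i) (fRowB a b i, 0)
    = (fMixB a b i j, ((bSup a b i j : ℕ) : Int)) := by
  induction j with
  | zero => rw [fMixB_zero]; simp [bSup]
  | succ j ih =>
    have hjm : j < b.length := hj
    rw [List.range_succ, List.foldl_append, ih (Nat.le_of_lt hjm)]
    simp only [List.foldl_cons, List.foldl_nil]
    show innerB a b i (fMixB a b i j, _) j = _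
    unfold innerB
    have hfj : (fMixB a b i j).getD j 0 = ((Col a b i j : ℕ) : Int) := by
      unfold fMixB
      rw [PySem.List.getD_map_range _ _ _ _ hjm, if_neg (lt_irrefl j)]
    have hcolsucc : Col a b (i + 1) j = Col a b i j ⊔ Ent a b i j := rfl
    have hsetf : ∀ w : Int, (fMixB a b i j).set j w
        = (List.range b.length).map fun q =>
            if q = j then w
            else if q < j then ((Col a b (i + 1) q : ℕ) : Int) else ((Col a b i q : ℕ) : Int) := by
      intro w
      unfold fMixB
      exact map_range_set b.length j _ w
    have hmixcongr : ∀ (h0 : Ent a b i j = 0), fMixB a b i j = fMixB a b i (j + 1) := by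
      intro h0
      unfold fMixB
      apply List.map_congr_left
      intro q _
      by_cases h2 : q < j
      · rw [if_pos h2, if_pos (Nat.lt_succ_of_lt h2)]
      · rw [if_neg h2]
        by_cases h3 : q = j
        · subst h3
          rw [if_pos (Nat.lt_succ_self q), hcolsucc, h0]
          simp
        · rw [if_neg (by omega)]
    by_cases hlt : b.getD j 0 < a.getD i 0
    · rw [if_pos hlt]
      have hne : a.getD i 0 ≠ b.getD j 0 := ne_of_gt hlt
      have h0 : Ent a b i j = 0 := Ent_zero_of_ne a b i j hne
      have hbool : (if (fMixB a b i j).getD j 0 > ((bSup a b i j : ℕ) : Int)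
            then ((fMixB a b i j), (fMixB a b i j).getD j 0)
            else ((fMixB a b i j), ((bSup a b i j : ℕ) : Int)))
          = (fMixB a b i j, max ((bSup a b i j : ℕ) : Int) ((Col a b i j : ℕ) : Int)) := by
        rw [hfj]
        split_ifs with h
        · rw [Prod.mk.injEq]
          exact ⟨rfl, (Int.max_eq_right (le_of_lt h)).symm⟩
        · rw [Prod.mk.injEq]
          exact ⟨rfl, (Int.max_eq_left (by omega)).symm⟩
      rw [hbool, Prod.mk.injEq]
      refine ⟨hmixcongr h0, ?_⟩
      rw [bSup_succ, if_pos hlt, Nat.cast_max, max_comm]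
    · rw [if_neg hlt]
      have hbs : ((bSup a b i (j + 1) : ℕ) : Int) = ((bSup a b i j : ℕ) : Int) := by
        rw [bSup_succ, if_neg hlt]
        simp
      by_cases hc : b.getD j 0 = a.getD i 0 ∧ ((bSup a b i j : ℕ) : Int) + 1 > (fMixB a b i j).getD j 0
      · rw [if_pos hc]
        obtain ⟨hab, hgt⟩ := hc
        rw [hfj] at hgt
        have hent : Ent a b i j = bSup a b i j + 1 := Ent_eq_bSup a b i j hab.symm
        rw [Prod.mk.injEq]
        refine ⟨?_, hbs.symm⟩
        rw [hsetf]
        unfold fMixB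
        apply List.map_congr_left
        intro q _
        by_cases h3 : q = j
        · subst h3
          rw [if_pos rfl, if_pos (Nat.lt_succ_self q), hcolsucc, hent]
          have : Col a b i q ⊔ (bSup a b i q + 1) = bSup a b i q + 1 := by
            rw [sup_eq_right]
            exact_mod_cast le_of_lt hgt
          rw [this]
          push_cast
          rfl
        · rw [if_neg h3]
          by_cases h2 : q < j
          · rw [if_pos h2, if_pos (Nat.lt_succ_of_lt h2)]
          · rw [if_neg h2, if_neg (by omega)]
      · rw [if_neg hc]
        rw [Prod.mk.injEq]
        refine ⟨?_, hbs.symm⟩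
        by_cases hab : a.getD i 0 = b.getD j 0
        · -- match but no improvement: Ent i j ≤ Col i j
          have hent : Ent a b i j = bSup a b i j + 1 := Ent_eq_bSup a b i j hab
          have hle : bSup a b i j + 1 ≤ Col a b i j := by
            have hng : ¬ (((bSup a b i j : ℕ) : Int) + 1 > (fMixB a b i j).getD j 0) := by
              intro hgt
              exact hc ⟨hab.symm, hgt⟩
            rw [hfj] at hng
            exact_mod_cast not_lt.mp hng
          unfold fMixB
          apply List.map_congr_left
          intro q _
          by_cases h3 : q = j
          · subst h3
            rw [if_neg (lt_irrefl q), if_pos (Nat.lt_succ_self q), hcolsucc, hent,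
              sup_eq_left.mpr hle]
          · by_cases h2 : q < j
            · rw [if_pos h2, if_pos (Nat.lt_succ_of_lt h2)]
            · rw [if_neg h2, if_neg (by omega)]
        · exact hmixcongr (Ent_zero_of_ne a b i j hab)

theorem B_outer (a b : List Int) (i : Nat) :
    (List.range i).foldl (outerB a b) (List.replicate b.length 0) = fRowB a b i := by
  induction i with
  | zero =>
    unfold fRowB
    rw [List.map_congr_left (g := fun _ => (0 : Int)) (fun j _ => by simp [Col])]
    simp [List.map_const']
  | succ i ih =>
    rw [List.range_succ, List.foldl_append, ih]
    simp only [List.foldl_cons, List.foldl_nil]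
    show outerB a b (fRowB a b i) i = _
    unfold outerB
    rw [B_row_partial a b i b.length le_rfl, fMixB_full]

-- ---------- max(f, default=0) as a Finset sup ----------

theorem foldl_max_map_range (m : Nat) (u : Nat → ℕ) (x : Int) (hx : 0 ≤ x) :
    (((List.range m).map fun j => ((u j : ℕ) : Int)).foldl max x)
    = max x (((Finset.range m).sup u : ℕ) : Int) := by
  induction m with
  | zero => simp [Int.max_eq_left hx]
  | succ m ih =>
    rw [List.range_succ, List.map_append, List.foldl_append, ih,
      Finset.range_add_one, Finset.sup_insert]
    simp only [List.map_cons, List.map_nil, List.foldl_cons, List.foldl_nil]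
    rw [sup_comm, Nat.cast_max, ← max_assoc, max_comm (((u m : ℕ) : Int)) x, max_assoc]

theorem sup_range_succ_left (m : Nat) (w : Nat → ℕ) :
    (Finset.range (m + 1)).sup w = w 0 ⊔ (Finset.range m).sup fun j => w (j + 1) := by
  induction m with
  | zero => simp
  | succ m ih =>
    rw [Finset.range_add_one, Finset.sup_insert, ih,
      Finset.range_add_one (n := m), Finset.sup_insert, sup_left_comm]

theorem maxD_map_range (m : Nat) (w : Nat → ℕ) :
    PySem.List.maxD ((List.range m).map fun j => ((w j : ℕ) : Int)) (fun y => y) 0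
    = (((Finset.range m).sup w : ℕ) : Int) := by
  cases m with
  | zero => simp [PySem.List.maxD, PySem.List.max?]
  | succ m =>
    rw [List.range_succ_eq_map, List.map_cons, List.map_map]
    unfold PySem.List.maxD
    rw [PySem.List.max?_id_cons]
    simp only [Option.getD_some, Function.comp_def, Nat.succ_eq_add_one]
    rw [foldl_max_map_range m (fun j => w (j + 1)) _ (Int.natCast_nonneg _),
      sup_range_succ_left, Nat.cast_max]

theorem lcis_alt_char (a b : List Int) :
    lcis_alt a b = (((Finset.range b.length).sup fun j => Col a b a.length j : ℕ) : Int) := by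
  rw [lcis_alt_eq, B_outer a b a.length]
  unfold fRowB
  exact maxD_map_range b.length _

-- ===== VERDICT (by name: the statement is the Claim_ definition above) =====
theorem lcis_spec : Claim_equal_lcis := by
  intro a b _
  show lcis a b = lcis_alt a b
  rw [lcis_char, lcis_alt_char]
  congr 1
  unfold ansSup
  rw [Finset.sup_comm]
  exact Finset.sup_congr rfl fun j _ => (Col_eq_sup a b a.length j).symm
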